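-- pv_equiv track=rewrite | github.com/tanisha-salvi/JPMC-Quant-Research-Case-Study | Tanisha_Salvi_Case_Study_Problem_2_Q_2.2_MAIN.py | generate_maxpay
-- ===== SOURCE A (Python) =====
-- def generate_maxpay(temp):
--     cur_max = 0
--     cur = 0
--     for i in temp:
--         # for every R draw, player gets +1, for every black draw, player gets -1
--         if i == 'R':
--             cur = cur + 1
--         else :
--             cur = cur - 1
--         # always selecting maximum payoff since user plays optimally
--         cur_max = max(cur, cur_max)
--     return cur_max
-- ===== SOURCE B (Python) =====
-- def generate_maxpay(temp):
--     # Right-to-left accumulation: best suffix-start payoff, floored at 0.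
--     # max(0, max prefix sum) == fold from the right with best = max(0, delta + best).
--     best = 0
--     for i in reversed(temp):
--         best = max(0, (1 if i == 'R' else -1) + best)
--     return best
-- ===== Notes on version B (the rewrite author's own statement) =====
-- stated objective: alternative
-- what changed: Replaces A's left-to-right loop carrying (cur, cur_max) with a single right-to-left fold carrying one accumulator best = max(0, delta + best), using the identity max(0, max prefix sum) = right-fold of that recurrence.
import Mathlib
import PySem

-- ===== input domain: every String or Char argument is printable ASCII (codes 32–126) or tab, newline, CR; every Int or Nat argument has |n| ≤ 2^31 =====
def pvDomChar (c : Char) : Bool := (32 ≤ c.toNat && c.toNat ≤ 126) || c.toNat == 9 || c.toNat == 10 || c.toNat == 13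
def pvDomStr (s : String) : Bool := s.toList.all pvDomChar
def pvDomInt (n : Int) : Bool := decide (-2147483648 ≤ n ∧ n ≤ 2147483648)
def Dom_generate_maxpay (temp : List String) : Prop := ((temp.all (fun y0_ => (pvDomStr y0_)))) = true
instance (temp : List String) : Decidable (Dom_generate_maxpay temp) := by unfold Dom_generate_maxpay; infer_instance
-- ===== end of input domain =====

-- B replaces A's left-to-right running-max loop with a right-to-left fold best = max(0, delta + best) (alternative decomposition, same cost).
-- ===== PORT A =====
def generate_maxpay (temp : List String) : Int :=
  (temp.foldl (fun (s : Int × Int) i =>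
      let cur := if i = "R" then s.2 + 1 else s.2 - 1
      (max cur s.1, cur)) (0, 0)).1

-- ===== PORT B =====
def generate_maxpay_alt (temp : List String) : Int :=
  temp.foldr (fun i best => max 0 ((if i = "R" then 1 else -1) + best)) 0

-- ===== PRECONDITION & SPEC =====
def Spec_generate_maxpay (temp : List String) (out : Int) : Prop := out = generate_maxpay_alt temp
instance (temp : List String) (out : Int) : Decidable (Spec_generate_maxpay temp out) := by unfold Spec_generate_maxpay; infer_instance

-- ===== CLAIM (what is proved, stated in full; the proofs are below) =====
def Claim_equal_generate_maxpay : Prop := ∀ (temp : List String), Dom_generate_maxpay temp → Spec_generate_maxpay temp (generate_maxpay temp)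

-- ===== LEMMAS AND PROOFS =====

theorem pv_alt_nonneg (l : List String) : 0 ≤ generate_maxpay_alt l := by
  induction l with
  | nil => simp [generate_maxpay_alt]
  | cons x xs ih => simp [generate_maxpay_alt] at ih ⊢

theorem pv_loop_eq (l : List String) : ∀ (m c : Int), c ≤ m →
    (l.foldl (fun (s : Int × Int) i =>
      let cur := if i = "R" then s.2 + 1 else s.2 - 1
      (max cur s.1, cur)) (m, c)).1 = max m (c + generate_maxpay_alt l) := by
  induction l with
  | nil => intro m c h; simp [generate_maxpay_alt]; omega
  | cons x xs ih =>
    intro m c h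
    have hnn := pv_alt_nonneg xs
    simp only [generate_maxpay_alt] at hnn
    simp only [List.foldl_cons, generate_maxpay_alt, List.foldr_cons]
    by_cases hx : x = "R" <;>
      simp only [hx, if_true, if_false] <;>
      [rw [ih (max (c+1) m) (c+1) (le_max_left _ _)];
       rw [ih (max (c-1) m) (c-1) (le_max_left _ _)]] <;>
      simp only [generate_maxpay_alt] <;> omega

-- ===== VERDICT (by name: the statement is the Claim_ definition above) =====
theorem generate_maxpay_spec : Claim_equal_generate_maxpay := by
  intro temp _
  unfold Spec_generate_maxpay generate_maxpay
  rw [pv_loop_eq temp 0 0 le_rfl]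
  have := pv_alt_nonneg temp
  omega
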